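-- pv_equiv track=rewrite | github.com/jk-jung/problem-solving | codewars/7kyu/7_Speed Limit.py | speed_limit
-- ===== SOURCE A (Python) =====
-- def speed_limit(speed, signals):
--     r = 0
--     for x in signals:
--         d = speed - x
--         if 10 <= d < 20: r += 100
--         if 20 <= d < 30: r += 250
--         if 30 <= d: r += 500
--     return r
-- ===== SOURCE B (Python) =====
-- def speed_limit(speed, signals):
--     # Cumulative-threshold counting: a signal exceeded by >=10 contributes 100,
--     # by >=20 an extra 150, by >=30 an extra 250 (100+150+250 = 500 total).
--     over10 = sum(1 for x in signals if x <= speed - 10)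
--     over20 = sum(1 for x in signals if x <= speed - 20)
--     over30 = sum(1 for x in signals if x <= speed - 30)
--     return 100 * over10 + 150 * over20 + 250 * over30
-- ===== Notes on version B (the rewrite author's own statement) =====
-- stated objective: alternative
-- what changed: Replaces the per-element band classification (if-cascade accumulator) by three staged passes counting how many signals cross each 10/20/30 threshold, combining the counts with marginal penalties 100+150+250.
import Mathlib
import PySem

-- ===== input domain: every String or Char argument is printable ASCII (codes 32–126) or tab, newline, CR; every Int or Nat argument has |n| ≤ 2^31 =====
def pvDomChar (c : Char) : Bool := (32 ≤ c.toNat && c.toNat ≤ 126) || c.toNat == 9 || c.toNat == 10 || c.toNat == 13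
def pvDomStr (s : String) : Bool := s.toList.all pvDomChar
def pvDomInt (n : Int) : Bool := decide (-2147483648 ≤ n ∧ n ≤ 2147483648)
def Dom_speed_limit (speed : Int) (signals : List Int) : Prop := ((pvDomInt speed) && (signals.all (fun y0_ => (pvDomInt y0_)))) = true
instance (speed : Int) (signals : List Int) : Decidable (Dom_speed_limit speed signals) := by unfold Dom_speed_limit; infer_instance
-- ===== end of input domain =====

-- B replaces A's per-element band if-cascade by three staged threshold-count
-- passes combined with marginal penalties 100+150+250 (alternative decomposition).

-- ===== PORT A =====
def speed_limit (speed : Int) (signals : List Int) : Int :=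
  signals.foldl (fun r x =>
    let d := speed - x
    let r := if 10 ≤ d ∧ d < 20 then r + 100 else r
    let r := if 20 ≤ d ∧ d < 30 then r + 250 else r
    if 30 ≤ d then r + 500 else r) 0

-- ===== PORT B =====
-- three staged counting passes, then a linear combination of the counts
def speed_limit_alt (speed : Int) (signals : List Int) : Int :=
  let over10 : Int := signals.countP (fun x => x ≤ speed - 10)
  let over20 : Int := signals.countP (fun x => x ≤ speed - 20)
  let over30 : Int := signals.countP (fun x => x ≤ speed - 30)
  100 * over10 + 150 * over20 + 250 * over30

-- ===== PRECONDITION & SPEC =====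
def Spec_speed_limit (speed : Int) (signals : List Int) (out : Int) : Prop := out = speed_limit_alt speed signals
instance (speed : Int) (signals : List Int) (out : Int) : Decidable (Spec_speed_limit speed signals out) := by unfold Spec_speed_limit; infer_instance

-- ===== CLAIM (what is proved, stated in full; the proofs are below) =====
def Claim_equal_speed_limit : Prop := ∀ (speed : Int) (signals : List Int), Dom_speed_limit speed signals → Spec_speed_limit speed signals (speed_limit speed signals)

-- ===== LEMMAS AND PROOFS =====

theorem pv_fold (speed : Int) (signals : List Int) (r : Int) :
    signals.foldl (fun r x =>
      let d := speed - x
      let r := if 10 ≤ d ∧ d < 20 then r + 100 else r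
      let r := if 20 ≤ d ∧ d < 30 then r + 250 else r
      if 30 ≤ d then r + 500 else r) r
    = r + 100 * (signals.countP (fun x => x ≤ speed - 10) : Int)
        + 150 * (signals.countP (fun x => x ≤ speed - 20) : Int)
        + 250 * (signals.countP (fun x => x ≤ speed - 30) : Int) := by
  induction signals generalizing r with
  | nil => simp
  | cons x xs ih =>
    simp only [List.foldl_cons, List.countP_cons, ih]
    by_cases h1 : x ≤ speed - 10 <;> by_cases h2 : x ≤ speed - 20 <;>
      by_cases h3 : x ≤ speed - 30 <;>
      simp [h1, h2, h3] <;> split_ifs <;> push_cast <;> omega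

-- ===== VERDICT (by name: the statement is the Claim_ definition above) =====
theorem speed_limit_spec : Claim_equal_speed_limit := by
  intro speed signals _
  unfold Spec_speed_limit speed_limit speed_limit_alt
  simp only [pv_fold]
  ring
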